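-- pv_equiv track=rewrite | github.com/RichardBangs/adventofcode2023 | 2023/day7/main.py | getHighCardValue2
-- ===== SOURCE A (Python) =====
-- def getHighCardValue2(hand) -> int:
--
-- 	handSize = len(hand)
--
-- 	sum = 0
-- 	for index in range(0, handSize):
--
-- 		value = 1
-- 		match(hand[index]):
-- 			case '2':	value = 2
-- 			case '3':	value = 3
-- 			case '4':	value = 4
-- 			case '5':	value = 5
-- 			case '6':	value = 6
-- 			case '7':	value = 7
-- 			case '8':	value = 8
-- 			case '9':	value = 9
-- 			case 'T':	value = 10
-- 			case 'J':	value = 1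
-- 			case 'Q':	value = 12
-- 			case 'K':	value = 13
-- 			case 'A':	value = 14
--
-- 		inc = value * (pow(16, (handSize-index)-1))
--
-- 		sum += inc
--
-- 	assert True
-- 	return sum
-- ===== SOURCE B (Python) =====
-- _HEX_DIGIT = {'2': '2', '3': '3', '4': '4', '5': '5', '6': '6', '7': '7',
--               '8': '8', '9': '9', 'T': 'a', 'J': '1', 'Q': 'c', 'K': 'd', 'A': 'e'}
--
--
-- def getHighCardValue2(hand) -> int:
--     if not hand:
--         return 0
--     return int(''.join(_HEX_DIGIT.get(ch, '1') for ch in hand), 16)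
-- ===== Notes on version B (the rewrite author's own statement) =====
-- stated objective: faster
-- what changed: Instead of summing value*pow(16,position) per index, B translates the hand into a hex-digit string (each card mapped to its hex digit, default '1') and parses it in one shot with int(s, 16).
import Mathlib
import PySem

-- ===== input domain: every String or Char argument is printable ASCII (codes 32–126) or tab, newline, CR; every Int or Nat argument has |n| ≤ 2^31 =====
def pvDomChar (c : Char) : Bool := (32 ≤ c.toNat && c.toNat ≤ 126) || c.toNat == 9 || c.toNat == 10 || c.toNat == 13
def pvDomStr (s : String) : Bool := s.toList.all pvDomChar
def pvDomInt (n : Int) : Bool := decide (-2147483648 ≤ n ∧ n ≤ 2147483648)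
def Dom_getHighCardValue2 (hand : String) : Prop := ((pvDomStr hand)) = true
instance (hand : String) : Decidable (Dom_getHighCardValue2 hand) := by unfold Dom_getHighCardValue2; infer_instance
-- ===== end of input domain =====

-- B translates the hand to a hex-digit string (default digit '1') and parses it with int(s,16), instead of A's per-index value*pow(16,k) sum.


-- ===== PORT A =====
-- the match statement of A: value = 1, reassigned by the matching case ('J' stays 1)
def pvCardValA (c : Char) : Int :=
  match c with
  | '2' => 2 | '3' => 3 | '4' => 4 | '5' => 5 | '6' => 6 | '7' => 7 | '8' => 8
  | '9' => 9 | 'T' => 10 | 'J' => 1 | 'Q' => 12 | 'K' => 13 | 'A' => 14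
  | _ => 1

-- pow(16, (handSize-index)-1): the exponent is always ≥ 0 in the loop, so .toNat is exact there
def getHighCardValue2 (hand : String) : Int :=
  let handSize : Int := PySem.Str.len hand
  (PySem.List.pyRange 0 handSize 1).foldl
    (fun sum index =>
      let value := pvCardValA (PySem.List.pyGetD hand.toList index ' ')
      let inc := value * (16 : Int) ^ ((handSize - index) - 1).toNat
      sum + inc) 0

-- ===== PORT B =====
def pvHexDict : PySem.Dict Char Char :=
  PySem.Dict.ofList
  [('2', '2'), ('3', '3'), ('4', '4'), ('5', '5'), ('6', '6'), ('7', '7'), ('8', '8'),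
   ('9', '9'), ('T', 'a'), ('J', '1'), ('Q', 'c'), ('K', 'd'), ('A', 'e')]

-- value of one hex digit, as int(_, 16) reads it ('0'-'9', 'a'-'f', 'A'-'F')
def pvHexVal (c : Char) : Int :=
  if c.isDigit then ((c.toNat : Int) - 48)
  else if 'a' ≤ c then ((c.toNat : Int) - 87)
  else ((c.toNat : Int) - 55)

-- port of Python's int(s, 16) on a string of valid hex digits
def pvParseHex (cs : List Char) : Int :=
  cs.foldl (fun a c => a * 16 + pvHexVal c) 0

def getHighCardValue2_alt (hand : String) : Int :=
  if hand.toList = [] then 0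
  else pvParseHex (hand.toList.map (fun ch => PySem.Dict.getD pvHexDict ch '1'))

-- ===== PRECONDITION & SPEC =====
def Spec_getHighCardValue2 (hand : String) (out : Int) : Prop := out = getHighCardValue2_alt hand
instance (hand : String) (out : Int) : Decidable (Spec_getHighCardValue2 hand out) := by unfold Spec_getHighCardValue2; infer_instance

-- ===== CLAIM (what is proved, stated in full; the proofs are below) =====
def Claim_equal_getHighCardValue2 : Prop := ∀ (hand : String), Dom_getHighCardValue2 hand → Spec_getHighCardValue2 hand (getHighCardValue2 hand)

-- ===== LEMMAS AND PROOFS =====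

-- A's per-character value equals the hex value of B's translated digit
theorem pvCardVal_eq (c : Char) :
    pvCardValA c = pvHexVal (PySem.Dict.getD pvHexDict c '1') := by
  have hd : pvHexDict = PySem.Dict.mk
      [('2', '2'), ('3', '3'), ('4', '4'), ('5', '5'), ('6', '6'), ('7', '7'), ('8', '8'),
       ('9', '9'), ('T', 'a'), ('J', '1'), ('Q', 'c'), ('K', 'd'), ('A', 'e')] := by decide
  simp only [pvCardValA]
  split
  case h_14 =>
    rename_i h2 h3 h4 h5 h6 h7 h8 h9 hT hJ hQ hK hA
    rw [hd, PySem.Dict.getD_eq_get?_getD]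
    simp only [PySem.Dict.get?_mk_cons, beq_iff_eq]
    rw [if_neg (fun h => h2 h.symm)]
    rw [if_neg (fun h => h3 h.symm)]
    rw [if_neg (fun h => h4 h.symm)]
    rw [if_neg (fun h => h5 h.symm)]
    rw [if_neg (fun h => h6 h.symm)]
    rw [if_neg (fun h => h7 h.symm)]
    rw [if_neg (fun h => h8 h.symm)]
    rw [if_neg (fun h => h9 h.symm)]
    rw [if_neg (fun h => hT h.symm)]
    rw [if_neg (fun h => hJ h.symm)]
    rw [if_neg (fun h => hQ h.symm)]
    rw [if_neg (fun h => hK h.symm)]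
    rw [if_neg (fun h => hA h.symm)]
    rfl
  all_goals decide

-- loop invariant: A's partial sum over indices [0, j) equals the parse of the first j translated digits times 16^(rest)
theorem pvPartial (cs : List Char) (j : Nat) (hj : j ≤ cs.length) :
    (PySem.List.pyRange 0 (j : Int) 1).foldl
      (fun sum index =>
        sum + pvCardValA (PySem.List.pyGetD cs index ' ') *
          (16 : Int) ^ (((cs.length : Int) - index) - 1).toNat) 0
    = pvParseHex ((cs.take j).map (fun ch => PySem.Dict.getD pvHexDict ch '1'))
        * (16 : Int) ^ (cs.length - j) := by
  induction j with
  | zero => simp [pvParseHex]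
  | succ j ih =>
    have hj' : j ≤ cs.length := Nat.le_of_succ_le hj
    have hlt : j < cs.length := hj
    rw [show ((j + 1 : Nat) : Int) = (j : Int) + 1 by push_cast; ring,
        PySem.List.pyRange_one_succ_right (by positivity), List.foldl_append, ih hj']
    have hget : PySem.List.pyGetD cs (j : Int) ' ' = cs[j] := by
      rw [PySem.List.pyGetD_natCast]
      simp [List.getD, hlt]
    have htake : cs.take (j + 1) = cs.take j ++ [cs[j]] := List.take_succ_eq_append_getElem hlt
    simp only [List.foldl_cons, List.foldl_nil]
    rw [hget, htake, List.map_append]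
    simp only [pvParseHex, List.map_cons, List.map_nil, List.foldl_append,
      List.foldl_cons, List.foldl_nil]
    have hpow : (16 : Int) ^ (cs.length - j) = (16 : Int) ^ (cs.length - (j + 1)) * 16 := by
      rw [← pow_succ]
      congr 1
      omega
    have hexp : (((cs.length : Int) - (j : Int)) - 1).toNat = cs.length - (j + 1) := by omega
    rw [hexp, hpow, pvCardVal_eq]
    ring

-- ===== VERDICT (by name: the statement is the Claim_ definition above) =====
theorem getHighCardValue2_spec : Claim_equal_getHighCardValue2 := by
  intro hand _
  unfold Spec_getHighCardValue2 getHighCardValue2 getHighCardValue2_alt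
  have h := pvPartial hand.toList hand.toList.length le_rfl
  simp only [List.take_length, Nat.sub_self, pow_zero, mul_one] at h
  by_cases he : hand.toList = []
  · simp [he, PySem.Str.len_eq, PySem.List.pyRange]
  · rw [if_neg he]
    simpa [PySem.Str.len_eq] using h
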